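/-
  FACTS ABOUT THE EXPECTED TOKENS (`Layout.tokens`) that the induction of Json/Jsmn/CorrectValue.lean needs:
  how many there are (`count`), that none is open, where their parent links point, and that a text has at least as many bytes as tokens.
-/
import Json.Jsmn.Scan

namespace Json
open Jsmn

/-! ### stampTok -/

@[simp] theorem stampTok_isOpen (cfg : Config) (e old : Token) : (stampTok cfg e old).isOpen = e.isOpen := by
  unfold stampTok; split <;> rfl
@[simp] theorem stampTok_type (cfg : Config) (e old : Token) : (stampTok cfg e old).type = e.type := by
  unfold stampTok; split <;> rfl
@[simp] theorem stampTok_size (cfg : Config) (e old : Token) : (stampTok cfg e old).size = e.size := by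
  unfold stampTok; split <;> rfl
theorem stampTok_parent_links {cfg : Config} (h : cfg.parentLinks = true) (e old : Token) : stampTok cfg e old = e := by
  simp [stampTok, h]

/-! ### How many -/

mutual
theorem Layout.tokens_length : (l : Layout) → (pos idx : Nat) → (par : Int) → (l.tokens pos idx par).length = l.count
  | .null, _, _, _ | .true, _, _, _ | .false, _, _, _ | .number _, _, _, _ | .string _, _, _, _ => rfl
  | .array _ items, pos, idx, par => by simp [Layout.tokens, Layout.count, Items.tokens_length items]; omega
  | .object _ members, pos, idx, par => by simp [Layout.tokens, Layout.count, Members.tokens_length members]; omega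
theorem Items.tokens_length : (is : Items) → (pos idx : Nat) → (par : Int) → (is.tokens pos idx par).length = is.count
  | .nil, _, _, _ => rfl
  | .cons _ item _ rest, pos, idx, par => by simp [Items.tokens, Items.count, Layout.tokens_length item, Items.tokens_length rest]
theorem Members.tokens_length : (ms : Members) → (pos idx : Nat) → (par : Int) → (ms.tokens pos idx par).length = ms.count
  | .nil, _, _, _ => rfl
  | .cons _ _ _ _ val _ rest, pos, idx, par => by
    simp [Members.tokens, Members.count, Layout.tokens_length val, Members.tokens_length rest]; omega
end

/-! ### Numbers and literals are what jsmn_parse_primitive scans -/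

/-- A text jsmn takes for a primitive, in every configuration: it starts with `-`, a digit, `t`, `f` or `n`, and consists of digits,
lower-case letters, `+ - .` and `E`. -/
def IsPrimText (t : List UInt8) : Prop := ∃ c0 t', t = c0 :: t' ∧ primStart c0 = true ∧ ∀ x ∈ t, primChar x = true

theorem isDigit_primChar {c : UInt8} (h : isDigit c = true) : primChar c = true := by simp [primChar, h]

theorem IsNumber.isPrimText {t : List UInt8} (h : IsNumber t) : IsPrimText t := by
  obtain ⟨minus, int, frac, exp, rfl, hm, hi, hf, he⟩ := h
  have hmc : ∀ x ∈ minus, primChar x = true := by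
    rcases hm with rfl | rfl <;> simp <;> decide
  have hic : ∀ x ∈ int, primChar x = true := by
    rcases hi with rfl | ⟨c, d, rfl, hc, hd⟩
    · simp; decide
    · intro x hx
      rcases List.mem_cons.mp hx with rfl | hx
      · exact isDigit_primChar (by simp [isDigit, isDigit19] at *; omega)
      · exact isDigit_primChar (hd x hx)
  have hfc : ∀ x ∈ frac, primChar x = true := by
    rcases hf with rfl | ⟨d, rfl, _, hd⟩
    · simp
    · intro x hx
      rcases List.mem_cons.mp hx with rfl | hx
      · decide
      · exact isDigit_primChar (hd x hx)
  have hec : ∀ x ∈ exp, primChar x = true := by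
    rcases he with rfl | ⟨e, sign, d, rfl, he, hs, _, hd⟩
    · simp
    · intro x hx
      rcases List.mem_cons.mp hx with rfl | hx
      · rcases he with rfl | rfl <;> decide
      · rcases List.mem_append.mp hx with hx | hx
        · rcases hs with rfl | rfl | rfl <;> simp at hx <;> subst hx <;> decide
        · exact isDigit_primChar (hd x hx)
  have hall : ∀ x ∈ minus ++ int ++ frac ++ exp, primChar x = true := by
    intro x hx
    simp only [List.mem_append] at hx
    rcases hx with ((hx | hx) | hx) | hx
    · exact hmc x hx
    · exact hic x hx
    · exact hfc x hx
    · exact hec x hx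
  obtain ⟨i0, int', rfl, hi0⟩ : ∃ i0 int', int = i0 :: int' ∧ isDigit i0 = true := by
    rcases hi with rfl | ⟨c, d, rfl, hc, _⟩
    · exact ⟨_, _, rfl, by decide⟩
    · exact ⟨_, _, rfl, by simp [isDigit, isDigit19] at *; omega⟩
  rcases hm with rfl | rfl
  · exact ⟨i0, int' ++ frac ++ exp, by simp, by simp [primStart, isDigit] at *; omega, hall⟩
  · exact ⟨0x2d, i0 :: int' ++ frac ++ exp, by simp, by decide, hall⟩

theorem isPrimText_null : IsPrimText [0x6e, 0x75, 0x6c, 0x6c] := ⟨_, _, rfl, by decide, by decide⟩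
theorem isPrimText_true : IsPrimText [0x74, 0x72, 0x75, 0x65] := ⟨_, _, rfl, by decide, by decide⟩
theorem isPrimText_false : IsPrimText [0x66, 0x61, 0x6c, 0x73, 0x65] := ⟨_, _, rfl, by decide, by decide⟩

theorem Layout.count_pos (l : Layout) : 0 < l.count := by cases l <;> simp [Layout.count] <;> omega

mutual
/-- A text has at least as many bytes as tokens. -/
theorem Layout.count_le_text : (l : Layout) → l.WellFormed → l.count ≤ l.text.length
  | .null, _ | .true, _ | .false, _ => by simp [Layout.count, Layout.text]
  | .string _, _ => by simp [Layout.count, Layout.text]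
  | .number _, wf => by
    obtain ⟨c0, t', rfl, _⟩ := IsNumber.isPrimText wf
    simp [Layout.count, Layout.text]
  | .array _ items, wf => by have := Items.count_le_text items wf.2; simp [Layout.count, Layout.text]; omega
  | .object _ members, wf => by have := Members.count_le_text members wf.2; simp [Layout.count, Layout.text]; omega
theorem Items.count_le_text : (is : Items) → is.WellFormed → is.count ≤ is.text.length ∧ is.count ≤ is.tail.length
  | .nil, _ => by simp [Items.count]
  | .cons _ item _ rest, wf => by
    have := Layout.count_le_text item wf.2.1; have := Items.count_le_text rest wf.2.2.2
    simp [Items.count, Items.text, Items.tail]; omega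
theorem Members.count_le_text : (ms : Members) → ms.WellFormed → ms.count ≤ ms.text.length ∧ ms.count ≤ ms.tail.length
  | .nil, _ => by simp [Members.count]
  | .cons _ _ _ _ val _ rest, wf => by
    have := Layout.count_le_text val wf.2.2.2.2.1; have := Members.count_le_text rest wf.2.2.2.2.2.2
    simp [Members.count, Members.text, Members.tail]; omega
end
/-! ### None is open -/

/-- No token of the list is open (opened and not yet closed). -/
def AllClosed (toks : List Token) : Prop := ∀ t ∈ toks, t.isOpen = false

theorem isOpen_nat_end (ty : Nat) (s : Int) (e : Nat) (sz par : Int) : (⟨ty, s, (e : Int), sz, par⟩ : Token).isOpen = false := by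
  have : (((e : Nat) : Int) == -1) = false := by rw [beq_eq_false_iff_ne]; omega
  simp only [Token.isOpen, this, Bool.and_false]

theorem AllClosed.getD {toks : List Token} (h : AllClosed toks) (j : Nat) : (toks.getD j default).isOpen = false := by
  by_cases hj : j < toks.length
  · have : toks.getD j default = toks[j] := by simp [List.getD, hj]
    rw [this]; exact h _ (List.getElem_mem hj)
  · have : toks.getD j default = default := by rw [List.getD_eq_getElem?_getD, List.getElem?_eq_none (by omega)]; rfl
    rw [this]; rfl

theorem AllClosed.append {a b : List Token} (ha : AllClosed a) (hb : AllClosed b) : AllClosed (a ++ b) := by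
  intro t ht; rcases List.mem_append.mp ht with h | h
  · exact ha t h
  · exact hb t h
theorem AllClosed.cons {t : Token} {b : List Token} (ht : t.isOpen = false) (hb : AllClosed b) : AllClosed (t :: b) := by
  intro t' ht'; rcases List.mem_cons.mp ht' with rfl | h
  · exact ht
  · exact hb _ h

mutual
theorem Layout.tokens_closed : (l : Layout) → (pos idx : Nat) → (par : Int) → AllClosed (l.tokens pos idx par)
  | .null, _, _, _ | .true, _, _, _ | .false, _, _, _ | .number _, _, _, _ | .string _, _, _, _ =>
    AllClosed.cons (isOpen_nat_end ..) (fun _ h => by simp at h)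
  | .array _ items, pos, idx, par => AllClosed.cons (isOpen_nat_end ..) (Items.tokens_closed items _ _ _)
  | .object _ members, pos, idx, par => AllClosed.cons (isOpen_nat_end ..) (Members.tokens_closed members _ _ _)
theorem Items.tokens_closed : (is : Items) → (pos idx : Nat) → (par : Int) → AllClosed (is.tokens pos idx par)
  | .nil, _, _, _ => fun _ h => by simp [Items.tokens] at h
  | .cons _ item _ rest, pos, idx, par => AllClosed.append (Layout.tokens_closed item _ _ _) (Items.tokens_closed rest _ _ _)
theorem Members.tokens_closed : (ms : Members) → (pos idx : Nat) → (par : Int) → AllClosed (ms.tokens pos idx par)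
  | .nil, _, _, _ => fun _ h => by simp [Members.tokens] at h
  | .cons _ _ _ _ val _ rest, pos, idx, par =>
    AllClosed.cons (isOpen_nat_end ..) (AllClosed.append (Layout.tokens_closed val _ _ _) (Members.tokens_closed rest _ _ _))
end

/-! ### Where the parent links point -/

/-- Every token of the list (stored from index `idx` on) has as parent either `par` or an earlier token of the list. -/
def ParentsOk (toks : List Token) (idx : Nat) (par : Int) : Prop :=
  ∀ j, j < toks.length → (toks.getD j default).parent = par ∨
    ((idx : Int) ≤ (toks.getD j default).parent ∧ (toks.getD j default).parent < idx + j)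

theorem getD_append_left {α : Type} (a b : List α) (d : α) {j : Nat} (h : j < a.length) : (a ++ b).getD j d = a.getD j d := by
  simp [List.getD, List.getElem?_append_left h]
theorem getD_append_right {α : Type} (a b : List α) (d : α) {j : Nat} (h : a.length ≤ j) : (a ++ b).getD j d = b.getD (j - a.length) d := by
  simp [List.getD, List.getElem?_append_right h]

theorem ParentsOk.nil (idx : Nat) (par : Int) : ParentsOk [] idx par := fun j h => by simp at h

theorem ParentsOk.append {a b : List Token} {idx : Nat} {par : Int} (ha : ParentsOk a idx par) (hb : ParentsOk b (idx + a.length) par) :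
    ParentsOk (a ++ b) idx par := by
  intro j hj
  by_cases h : j < a.length
  · rw [getD_append_left _ _ _ h]; exact ha j h
  · rw [getD_append_right _ _ _ (by omega)]
    rcases hb (j - a.length) (by simp at hj; omega) with h' | h'
    · exact Or.inl h'
    · refine Or.inr ⟨by omega, ?_⟩
      have := h'.2
      simp only [Int.natCast_add] at this; omega

/-- A token with parent `par` followed by tokens whose parent is it (`v`) and by further tokens with parent `par` (`r`). -/
theorem ParentsOk.cons_append {t : Token} {v r : List Token} {idx : Nat} {par : Int} (ht : t.parent = par)
    (hv : ParentsOk v (idx + 1) idx) (hr : ParentsOk r (idx + 1 + v.length) par) : ParentsOk (t :: (v ++ r)) idx par := by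
  intro j hj
  cases j with
  | zero => exact Or.inl ht
  | succ j =>
    simp only [List.getD_cons_succ]
    by_cases hjv : j < v.length
    · rw [getD_append_left _ _ _ hjv]
      rcases hv j hjv with h | h
      · exact Or.inr ⟨by omega, by omega⟩
      · exact Or.inr ⟨by have := h.1; simp only [Int.natCast_add] at this; omega, by have := h.2; simp only [Int.natCast_add] at this; omega⟩
    · rw [getD_append_right _ _ _ (by omega)]
      rcases hr (j - v.length) (by simp at hj; omega) with h | h
      · exact Or.inl h
      · exact Or.inr ⟨by have := h.1; simp only [Int.natCast_add] at this; omega, by have := h.2; simp only [Int.natCast_add] at this; omega⟩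

mutual
theorem Layout.tokens_parents : (l : Layout) → (pos idx : Nat) → (par : Int) → ParentsOk (l.tokens pos idx par) idx par
  | .null, _, _, _ | .true, _, _, _ | .false, _, _, _ | .number _, _, _, _ | .string _, _, _, _ => by
    intro j hj
    have : j = 0 := by simp [Layout.tokens] at hj; omega
    subst this; exact Or.inl rfl
  | .array ws items, pos, idx, par => by
    have := ParentsOk.cons_append (t := ⟨JSMN_ARRAY, pos, (pos + (1 + ws.length + items.text.length + 1) : Nat), items.length, par⟩)
      (r := []) (par := par) rfl (Items.tokens_parents items (pos + 1 + ws.length) (idx + 1) idx) (ParentsOk.nil _ _)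
    simpa [Layout.tokens] using this
  | .object ws members, pos, idx, par => by
    have := ParentsOk.cons_append (t := ⟨JSMN_OBJECT, pos, (pos + (1 + ws.length + members.text.length + 1) : Nat), members.length, par⟩)
      (r := []) (par := par) rfl (Members.tokens_parents members (pos + 1 + ws.length) (idx + 1) idx) (ParentsOk.nil _ _)
    simpa [Layout.tokens] using this
theorem Items.tokens_parents : (is : Items) → (pos idx : Nat) → (par : Int) → ParentsOk (is.tokens pos idx par) idx par
  | .nil, _, _, _ => ParentsOk.nil _ _
  | .cons pre item post rest, pos, idx, par => by
    have h := Items.tokens_parents rest (pos + pre.length + item.text.length + post.length + 1) (idx + item.count) par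
    exact ParentsOk.append (Layout.tokens_parents item _ idx par) (by rw [Layout.tokens_length]; exact h)
theorem Members.tokens_parents : (ms : Members) → (pos idx : Nat) → (par : Int) → ParentsOk (ms.tokens pos idx par) idx par
  | .nil, _, _, _ => ParentsOk.nil _ _
  | .cons pre key mid pre' val post rest, pos, idx, par => by
    have h := Members.tokens_parents rest
      (pos + pre.length + 1 + key.length + 1 + mid.length + 1 + pre'.length + val.text.length + post.length + 1) (idx + 1 + val.count) par
    exact ParentsOk.cons_append rfl (Layout.tokens_parents val _ (idx + 1) idx) (by rw [Layout.tokens_length]; exact h)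
end

end Json
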